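-- pv_equiv track=rewrite | github.com/jbruneaubongard/linguistic_patterns_wikipedia | scripts/data_viz/utils.py | get_overlap_speakers_for_plot
-- ===== SOURCE A (Python) =====
-- def get_overlap_speakers_for_plot(sets_of_speakers: list):
--     """
--     Returns a list of lists of sets of speakers for each interval
--     overlap_speakers[i][j] is the set of speakers in the ith interval that appeared for the first time in the jth interval
--     /!\ overlap_speakers[i][j] contains only speakers that appeared in all of the intervals from j to i
--     """
--     overlap_speakers = []
--     for i in range(len(sets_of_speakers)):
--         if i==0:
--             overlap_speakers.append([sets_of_speakers[i]])
--         else: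
--             list_of_sets = [overlap_speakers[i-1][j].intersection(sets_of_speakers[i]) for j in range(i)]
--             list_of_sets.append(sets_of_speakers[i].difference(set.union(*list_of_sets)))
--             overlap_speakers.append(list_of_sets)
--     return overlap_speakers
-- ===== SOURCE B (Python) =====
-- def get_overlap_speakers_for_plot(sets_of_speakers: list):
--     """Bucket each interval's speakers by the start of their current continuous
--     run: run_start maps every speaker of the current interval to the index where
--     that run began, and column j of row i is read off interval j directly
--     (columns where no current run starts are empty)."""
--     overlap_speakers = []
--     run_start = {}
--     for i, speakers in enumerate(sets_of_speakers):
--         run_start = {s: (run_start[s] if s in run_start else i) for s in speakers}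
--         starts = set(run_start.values())
--         overlap_speakers.append([{s for s in sets_of_speakers[j]
--                                   if run_start.get(s) == j}
--                                  if j in starts else set()
--                                  for j in range(i + 1)])
--     return overlap_speakers
-- ===== Notes on version B (the rewrite author's own statement) =====
-- stated objective: alternative
-- what changed: Instead of cascading set intersections through the previous output row (and a union/difference for the diagonal), B maintains a run_start dict mapping each current speaker to the index where its continuous run began and builds every cell of row i directly as {s in sets_of_speakers[j] : run_start[s] == j}.
import Mathlib
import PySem

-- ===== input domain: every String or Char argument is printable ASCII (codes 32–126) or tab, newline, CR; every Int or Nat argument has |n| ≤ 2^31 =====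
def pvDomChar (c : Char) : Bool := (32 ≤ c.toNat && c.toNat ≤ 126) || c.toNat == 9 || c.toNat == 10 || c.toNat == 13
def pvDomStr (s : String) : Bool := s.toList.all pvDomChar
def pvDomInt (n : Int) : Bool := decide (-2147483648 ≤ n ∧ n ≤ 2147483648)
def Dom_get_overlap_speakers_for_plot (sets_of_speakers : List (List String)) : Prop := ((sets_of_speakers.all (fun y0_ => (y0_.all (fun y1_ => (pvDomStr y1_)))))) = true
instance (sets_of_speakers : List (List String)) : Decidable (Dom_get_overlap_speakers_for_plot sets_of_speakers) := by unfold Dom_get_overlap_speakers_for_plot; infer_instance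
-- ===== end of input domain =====

-- B builds each row by bucketing speakers by the start index of their current continuous run
-- (a run_start dict) and reading each column off the original intervals, instead of cascading
-- set intersections through the previous output row (objective: alternative, same return value).

-- ===== PORT A =====
-- loop body of A's 'for i in range(len(sets_of_speakers))'
def pvStepA (sets_of_speakers : List (List String))
    (overlap_speakers : List (List (List String))) (i : Int) : List (List (List String)) :=
  if i == 0 then
    overlap_speakers ++ [[PySem.List.pyGetD sets_of_speakers i []]]
  else
    let list_of_sets := (PySem.List.pyRange 0 i 1).map (fun j =>
      PySem.Set.inter (PySem.List.pyGetD (PySem.List.pyGetD overlap_speakers (i - 1) []) j [])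
        (PySem.List.pyGetD sets_of_speakers i []))
    -- set.union(*list_of_sets): union of the i sets (here i ≥ 1, so the [] arm is unreachable)
    let u := match list_of_sets with
      | [] => []
      | x :: rest => rest.foldl PySem.Set.union x
    overlap_speakers ++
      [list_of_sets ++ [PySem.Set.diff (PySem.List.pyGetD sets_of_speakers i []) u]]

def get_overlap_speakers_for_plot (sets_of_speakers : List (List String)) :
    List (List (List String)) :=
  (PySem.List.pyRange 0 (PySem.List.len sets_of_speakers) 1).foldl (pvStepA sets_of_speakers) []

-- ===== PORT B =====
-- loop body of B's 'for i, speakers in enumerate(sets_of_speakers)'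
def pvStepB (sets_of_speakers : List (List String))
    (st : List (List (List String)) × PySem.Dict String Int)
    (iv : Int × List String) : List (List (List String)) × PySem.Dict String Int :=
  -- run_start = {s: (run_start[s] if s in run_start else i) for s in speakers}
  let run_start : PySem.Dict String Int := iv.2.foldl
    (fun d s => d.insert s (match st.2.get? s with | some v => v | none => iv.1))
    PySem.Dict.empty
  -- starts = set(run_start.values())
  let starts := PySem.Set.ofList run_start.values
  -- [{s for s in sets_of_speakers[j] if run_start.get(s) == j} if j in starts else set()
  --  for j in range(i + 1)]
  let row := (PySem.List.pyRange 0 (iv.1 + 1) 1).map (fun j =>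
    if starts.contains j then
      PySem.Set.ofList ((PySem.List.pyGetD sets_of_speakers j []).filter
        (fun s => run_start.get? s == some j))
    else [])
  (st.1 ++ [row], run_start)

def get_overlap_speakers_for_plot_alt (sets_of_speakers : List (List String)) :
    List (List (List String)) :=
  ((PySem.List.enumerate sets_of_speakers).foldl (pvStepB sets_of_speakers)
    ([], PySem.Dict.empty)).1

-- ===== PRECONDITION & SPEC =====
-- The inner lists model Python sets (the parameter is list[set[str]]): Pre_ states the
-- set-representation invariant — distinct elements; a list with duplicates encodes no Python input.
def Pre_get_overlap_speakers_for_plot (sets_of_speakers : List (List String)) : Prop :=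
  ∀ l ∈ sets_of_speakers, l.Nodup
instance (sets_of_speakers : List (List String)) : Decidable (Pre_get_overlap_speakers_for_plot sets_of_speakers) := by unfold Pre_get_overlap_speakers_for_plot; infer_instance

def pvWitness_get_overlap_speakers_for_plot : List (List String) := [["a", "b"], ["b", "c"]]

def Spec_get_overlap_speakers_for_plot (sets_of_speakers : List (List String)) (out : List (List (List String))) : Prop := out = get_overlap_speakers_for_plot_alt sets_of_speakers
instance (sets_of_speakers : List (List String)) (out : List (List (List String))) : Decidable (Spec_get_overlap_speakers_for_plot sets_of_speakers out) := by unfold Spec_get_overlap_speakers_for_plot; infer_instance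

-- ===== CLAIM (what is proved, stated in full; the proofs are below) =====
def Claim_equal_get_overlap_speakers_for_plot : Prop := ∀ (sets_of_speakers : List (List String)), Dom_get_overlap_speakers_for_plot sets_of_speakers → Pre_get_overlap_speakers_for_plot sets_of_speakers → Spec_get_overlap_speakers_for_plot sets_of_speakers (get_overlap_speakers_for_plot sets_of_speakers)

-- ===== LEMMAS AND PROOFS =====
def pvS (sets : List (List String)) (j : Nat) : List String := sets.getD j []

def pvP (sets : List (List String)) (i j : Nat) (s : String) : Prop :=
  (∀ k ≤ i, j ≤ k → s ∈ pvS sets k) ∧ (j = 0 ∨ s ∉ pvS sets (j - 1))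

theorem pvNodup_pvS (sets : List (List String))
    (hpre : ∀ l ∈ sets, l.Nodup) (k : Nat) : (pvS sets k).Nodup := by
  unfold pvS
  rcases h : sets[k]? with _ | l
  · simp [List.getD, h]
  · simpa [List.getD, h] using hpre l (List.mem_of_getElem? h)

theorem pvP_succ (sets : List (List String)) (i j : Nat) (s : String) (hj : j ≤ i) :
    pvP sets (i + 1) j s ↔ pvP sets i j s ∧ s ∈ pvS sets (i + 1) := by
  constructor
  · rintro ⟨h1, h2⟩
    exact ⟨⟨fun k hk hjk => h1 k (by omega) hjk, h2⟩, h1 (i+1) le_rfl (by omega)⟩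
  · rintro ⟨⟨h1, h2⟩, hmem⟩
    refine ⟨fun k hk hjk => ?_, h2⟩
    rcases Nat.lt_or_ge k (i+1) with hk' | hk'
    · exact h1 k (by omega) hjk
    · have hke : k = i+1 := by omega
      subst hke; exact hmem

theorem pvP_mem (sets : List (List String)) (i j : Nat) (s : String) (hj : j ≤ i)
    (h : pvP sets i j s) : s ∈ pvS sets j := h.1 j hj le_rfl

theorem pvP_uniq (sets : List (List String)) (i j j' : Nat) (s : String)
    (hj : j ≤ i) (hj' : j' ≤ i) (h : pvP sets i j s) (h' : pvP sets i j' s) : j = j' := by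
  by_contra hne
  rcases Nat.lt_or_ge j j' with hlt | hge
  · have hsj := h.1 (j' - 1) (by omega) (by omega)
    rcases h'.2 with h0 | hnot
    · omega
    · exact hnot hsj
  · have hlt' : j' < j := by omega
    have hsj := h'.1 (j - 1) (by omega) (by omega)
    rcases h.2 with h0 | hnot
    · omega
    · exact hnot hsj

theorem pvP_exists (sets : List (List String)) (i : Nat) (s : String)
    (h : s ∈ pvS sets i) : ∃ j ≤ i, pvP sets i j s := by
  induction i with
  | zero =>
    refine ⟨0, le_rfl, ⟨fun k hk _ => ?_, Or.inl rfl⟩⟩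
    have hk0 : k = 0 := by omega
    subst hk0; exact h
  | succ i ih =>
    by_cases hi : s ∈ pvS sets i
    · obtain ⟨j, hj, hP⟩ := ih hi
      exact ⟨j, by omega, (pvP_succ sets i j s hj).mpr ⟨hP, h⟩⟩
    · refine ⟨i+1, le_rfl, ⟨fun k hk1 hk2 => ?_, Or.inr (by simpa using hi)⟩⟩
      have hke : k = i+1 := by omega
      subst hke; exact h

theorem pvP_diag (sets : List (List String)) (m : Nat) (s : String)
    (hs : s ∈ pvS sets (m + 1)) :
    (¬ ∃ j < m + 1, pvP sets (m + 1) j s) ↔ pvP sets (m + 1) (m + 1) s := by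
  constructor
  · intro hno
    refine ⟨fun k hk1 hk2 => ?_, Or.inr ?_⟩
    · have hke : k = m+1 := by omega
      subst hke; exact hs
    · intro hsm
      obtain ⟨j, hj, hP⟩ := pvP_exists sets m s (by simpa using hsm)
      exact hno ⟨j, by omega, (pvP_succ sets m j s hj).mpr ⟨hP, hs⟩⟩
  · rintro hP ⟨j, hjlt, hPj⟩
    have := pvP_uniq sets (m+1) j (m+1) s (by omega) le_rfl hPj hP
    omega

theorem pvMem_foldl_union (l : List (List String)) (x : List String) (y : String) :
    y ∈ l.foldl PySem.Set.union x ↔ y ∈ x ∨ ∃ t ∈ l, y ∈ t := by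
  induction l generalizing x with
  | nil => simp
  | cons t l ih =>
    rw [List.foldl_cons, ih]
    simp [PySem.Set.mem_union]
    tauto

theorem pvGet?_foldl_insert (l : List String) (f : String → Int)
    (d0 : PySem.Dict String Int) (x : String) :
    (l.foldl (fun d s => d.insert s (f s)) d0).get? x =
      if x ∈ l then some (f x) else d0.get? x := by
  induction l generalizing d0 with
  | nil => simp
  | cons a l ih =>
    rw [List.foldl_cons, ih]
    by_cases hx : x ∈ l
    · simp [hx]
    · by_cases hxa : x = a
      · subst hxa; simp [hx, PySem.Dict.get?_insert_self]
      · simp [PySem.Dict.get?_insert, hx, hxa]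

def pvPb (sets : List (List String)) (i j : Nat) (s : String) : Bool :=
  decide (∀ k ≤ i, j ≤ k → s ∈ pvS sets k) &&
    (decide (j = 0) || !decide (s ∈ pvS sets (j - 1)))

theorem pvPb_iff (sets : List (List String)) (i j : Nat) (s : String) :
    pvPb sets i j s = true ↔ pvP sets i j s := by
  simp [pvPb, pvP]

def pvDI (sets : List (List String)) (n : Nat) (d : PySem.Dict String Int) : Prop :=
  ∀ (s : String) (j : Int),
    d.get? s = some j ↔ ∃ jn : Nat, j = (jn : Int) ∧ jn < n ∧ pvP sets (n - 1) jn s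

theorem pvDI_step (sets : List (List String)) (m : Nat) (d : PySem.Dict String Int)
    (hd : pvDI sets m d) :
    pvDI sets (m + 1) ((pvS sets m).foldl
      (fun d' s => d'.insert s (match d.get? s with | some v => v | none => (m : Int)))
      PySem.Dict.empty) := by
  intro s j
  rw [pvGet?_foldl_insert]
  simp only [Nat.add_sub_cancel]
  by_cases hs : s ∈ pvS sets m
  · rw [if_pos hs]
    rcases hds : d.get? s with _ | j0
    · -- none: no earlier run; value is m
      have hno : ¬ ∃ jn < m, pvP sets (m - 1) jn s := by
        rintro ⟨jn, hlt, hP⟩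
        have := (hd s (jn : Int)).mpr ⟨jn, rfl, hlt, hP⟩
        rw [hds] at this; cases this
      have hPm : pvP sets m m s := by
        cases m with
        | zero =>
          refine ⟨fun k hk _ => ?_, Or.inl rfl⟩
          have hk0 : k = 0 := by omega
          subst hk0; exact hs
        | succ m' =>
          refine (pvP_diag sets m' s hs).mp ?_
          rintro ⟨jj, hjj, hPjj⟩
          exact hno ⟨jj, by omega, ((pvP_succ sets m' jj s (by omega)).mp hPjj).1⟩
      constructor
      · rintro h
        injection h with h
        exact ⟨m, h.symm, by omega, hPm⟩
      · rintro ⟨jn, rfl, hlt, hP⟩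
        have hjn : jn = m := by
          by_contra hne
          have hlt' : jn < m := by omega
          cases m with
          | zero => omega
          | succ m' =>
            exact hno ⟨jn, hlt', by
              simpa using ((pvP_succ sets m' jn s (by omega)).mp hP).1⟩
        subst hjn; rfl
    · -- some j0: carried-over run start
      obtain ⟨jn0, rfl, hlt0, hP0⟩ := (hd s j0).mp hds
      have hm1 : m - 1 + 1 = m := by omega
      have hP0m : pvP sets m jn0 s := by
        have := (pvP_succ sets (m-1) jn0 s (by omega)).mpr ⟨hP0, by rw [hm1]; exact hs⟩
        rwa [hm1] at this
      constructor
      · rintro h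
        injection h with h
        exact ⟨jn0, h.symm, by omega, hP0m⟩
      · rintro ⟨jn, rfl, hlt, hP⟩
        have : jn0 = jn := pvP_uniq sets m jn0 jn s (by omega) (by omega) hP0m hP
        subst this; rfl
  · rw [if_neg hs]
    constructor
    · rintro h; cases h
    · rintro ⟨jn, rfl, hlt, hP⟩
      exact absurd (hP.1 m le_rfl (by omega)) hs

def pvCell (sets : List (List String)) (i j : Nat) : List String :=
  (pvS sets j).filter (pvPb sets i j)

def pvRow (sets : List (List String)) (i : Nat) : List (List String) :=
  (List.range (i + 1)).map (pvCell sets i)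

theorem pvCell_zero (sets : List (List String)) : pvCell sets 0 0 = pvS sets 0 := by
  unfold pvCell
  apply List.filter_eq_self.mpr
  intro s hs
  rw [pvPb_iff]
  refine ⟨fun k hk _ => ?_, Or.inl rfl⟩
  have hk0 : k = 0 := by omega
  subst hk0; exact hs

theorem pvCell_succ (sets : List (List String)) (m k : Nat) (hk : k < m + 1) :
    PySem.Set.inter (pvCell sets m k) (pvS sets (m + 1)) = pvCell sets (m + 1) k := by
  unfold pvCell PySem.Set.inter
  rw [List.filter_filter]
  apply List.filter_congr
  intro s hs
  rw [Bool.eq_iff_iff]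
  simp only [Bool.and_eq_true, pvPb_iff, PySem.Set.contains_eq_listContains,
    List.contains_iff_mem]
  constructor
  · rintro ⟨hm, hP⟩
    exact (pvP_succ sets m k s (by omega)).mpr ⟨hP, hm⟩
  · intro hP
    obtain ⟨h1, h2⟩ := (pvP_succ sets m k s (by omega)).mp hP
    exact ⟨h2, h1⟩

theorem pvRow_getD (sets : List (List String)) (m k : Nat) (hk : k < m + 1) :
    (pvRow sets m).getD k [] = pvCell sets m k := by
  simp [pvRow, List.getD, hk]

theorem pvDiff_eq (sets : List (List String)) (m : Nat) (x : List String)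
    (rest : List (List String))
    (hxr : x :: rest = (List.range (m + 1)).map (pvCell sets (m + 1))) :
    PySem.Set.diff (pvS sets (m + 1)) (rest.foldl PySem.Set.union x) =
      pvCell sets (m + 1) (m + 1) := by
  unfold PySem.Set.diff pvCell
  apply List.filter_congr
  intro s hs
  have hmem : s ∈ rest.foldl PySem.Set.union x ↔ ∃ j < m + 1, pvP sets (m + 1) j s := by
    rw [pvMem_foldl_union]
    have hiff : (s ∈ x ∨ ∃ t ∈ rest, s ∈ t) ↔ ∃ t ∈ x :: rest, s ∈ t := by simp
    rw [hiff, hxr]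
    constructor
    · rintro ⟨t, ht, hst⟩
      rw [List.mem_map] at ht
      obtain ⟨j, hj, rfl⟩ := ht
      rw [List.mem_range] at hj
      exact ⟨j, hj, (pvPb_iff sets (m+1) j s).mp (List.mem_filter.mp hst).2⟩
    · rintro ⟨j, hj, hP⟩
      refine ⟨pvCell sets (m + 1) j, ?_, ?_⟩
      · rw [List.mem_map]
        exact ⟨j, by simpa using hj, rfl⟩
      · exact List.mem_filter.mpr ⟨pvP_mem sets (m+1) j s (by omega) hP,
          (pvPb_iff sets (m+1) j s).mpr hP⟩
  rw [Bool.eq_iff_iff]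
  simp only [pvPb_iff, PySem.Set.contains_eq_listContains, Bool.not_eq_eq_eq_not, Bool.not_true]
  have hcon : List.contains (rest.foldl PySem.Set.union x) s = false ↔
      ¬ ∃ j < m + 1, pvP sets (m + 1) j s := by
    rw [← hmem]; simp
  rw [hcon]
  exact pvP_diag sets m s hs

theorem pvStepA_eq (sets : List (List String)) (m : Nat) :
    pvStepA sets ((List.range m).map (pvRow sets)) ((m : Nat) : Int) =
      (List.range (m + 1)).map (pvRow sets) := by
  cases m with
  | zero =>
    unfold pvStepA
    simp [pvRow, pvCell_zero, pvS, PySem.List.pyGetD_zero, List.getD]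
  | succ m =>
    have hne : (((m + 1 : Nat) : Int) == 0) = false := by
      rw [beq_eq_false_iff_ne]
      push_cast; omega
    unfold pvStepA
    rw [hne]
    simp only [Bool.false_eq_true, if_false]
    have hsub : ((m + 1 : Nat) : Int) - 1 = (m : Int) := by push_cast; ring
    have hgetprev : PySem.List.pyGetD ((List.range (m + 1)).map (pvRow sets)) (((m + 1 : Nat) : Int) - 1) [] = pvRow sets m := by
      rw [hsub, PySem.List.pyGetD_natCast]
      simp [List.getD]
    have hgetS : PySem.List.pyGetD sets (((m + 1 : Nat) : Int)) [] = pvS sets (m + 1) := by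
      rw [PySem.List.pyGetD_natCast]; rfl
    have hrange : PySem.List.pyRange 0 ((m + 1 : Nat) : Int) 1 = (List.range (m + 1)).map (fun k => ((k : Nat) : Int)) :=
      PySem.List.pyRange_zero_natCast (m + 1)
    rw [hgetprev, hgetS, hrange, List.map_map]
    have hlos : (List.range (m + 1)).map
        ((fun j => PySem.Set.inter (PySem.List.pyGetD (pvRow sets m) j []) (pvS sets (m + 1))) ∘
          (fun k : Nat => (k : Int))) = (List.range (m + 1)).map (pvCell sets (m + 1)) := by
      apply List.map_congr_left
      intro k hk
      rw [List.mem_range] at hk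
      simp only [Function.comp]
      rw [PySem.List.pyGetD_natCast, pvRow_getD sets m k hk, pvCell_succ sets m k hk]
    rw [hlos]
    rcases hcons : (List.range (m + 1)).map (pvCell sets (m + 1)) with _ | ⟨x, rest⟩
    · exact absurd hcons (by simp)
    · rw [pvDiff_eq sets m x rest hcons.symm]
      rw [List.range_succ (n := m + 1), List.map_append]
      have hrow : pvRow sets (m + 1) = (x :: rest) ++ [pvCell sets (m + 1) (m + 1)] := by
        rw [pvRow, List.range_succ (n := m + 1), List.map_append, hcons]
        rfl
      simp only [List.map_cons, List.map_nil]
      rw [hrow]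

theorem pvA_eq (sets : List (List String)) :
    get_overlap_speakers_for_plot sets = (List.range sets.length).map (pvRow sets) := by
  unfold get_overlap_speakers_for_plot
  rw [PySem.List.len_eq, PySem.List.pyRange_zero_natCast, List.foldl_map]
  generalize sets.length = n
  induction n with
  | zero => rfl
  | succ n ih =>
    rw [List.range_succ, List.foldl_append, ih, List.foldl_cons, List.foldl_nil,
      ← List.range_succ]
    exact pvStepA_eq sets n

theorem pvStepB_eq (sets : List (List String)) (hpre : ∀ l ∈ sets, l.Nodup)
    (m : Nat) (rows : List (List (List String))) (d : PySem.Dict String Int)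
    (hd : pvDI sets m d) :
    pvStepB sets (rows, d) (((m : Nat) : Int), PySem.List.pyGetD sets ((m : Nat) : Int) []) =
      (rows ++ [pvRow sets m],
        (pvS sets m).foldl
          (fun d' s => d'.insert s (match d.get? s with | some v => v | none => (m : Int)))
          PySem.Dict.empty) := by
  unfold pvStepB
  have hS : PySem.List.pyGetD sets ((m : Nat) : Int) [] = pvS sets m := by
    rw [PySem.List.pyGetD_natCast]; rfl
  rw [hS]
  have hd' : pvDI sets (m + 1) ((pvS sets m).foldl
      (fun d' s => d'.insert s (match d.get? s with | some v => v | none => (m : Int)))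
      PySem.Dict.empty) := pvDI_step sets m d hd
  set d' := (pvS sets m).foldl
      (fun d'' s => d''.insert s (match d.get? s with | some v => v | none => (m : Int)))
      PySem.Dict.empty with hd'def
  refine Prod.ext ?_ rfl
  simp only
  congr 1
  -- row = [pvRow sets m]
  have hb : ((m : Int) + 1) = ((m + 1 : Nat) : Int) := by push_cast; ring
  rw [hb, PySem.List.pyRange_zero_natCast, List.map_map]
  rw [pvRow]
  congr 1
  apply List.map_congr_left
  intro k hk
  rw [List.mem_range] at hk
  simp only [Function.comp]
  rw [PySem.List.pyGetD_natCast]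
  by_cases hc : PySem.Set.contains (PySem.Set.ofList d'.values) ((k : Nat) : Int) = true
  case neg =>
    rw [if_neg hc]
    symm
    rw [pvCell, List.filter_eq_nil_iff]
    intro s hs hPb
    apply hc
    rw [PySem.Set.contains_iff, PySem.Set.mem_ofList]
    have hget : d'.get? s = some ((k : Nat) : Int) :=
      (hd' s ((k : Nat) : Int)).mpr ⟨k, rfl, by omega, (pvPb_iff sets m k s).mp hPb⟩
    have hitem := PySem.Dict.mem_items_of_get?_eq_some _ hget
    exact List.mem_map_of_mem hitem
  rw [if_pos hc]
  have hfilter : (pvS sets k).filter (fun s => d'.get? s == some ((k : Nat) : Int)) =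
      pvCell sets m k := by
    apply List.filter_congr
    intro s hs
    rw [Bool.eq_iff_iff, beq_iff_eq, pvPb_iff, hd' s ((k : Nat) : Int)]
    constructor
    · rintro ⟨jn, hjn, hlt, hP⟩
      have : k = jn := by exact_mod_cast hjn
      subst this
      simpa using hP
    · intro hP
      exact ⟨k, rfl, by omega, by simpa using hP⟩
  have hgk : sets.getD k [] = pvS sets k := rfl
  rw [hgk, hfilter]
  exact PySem.Set.ofList_eq_self_of_nodup _ (List.Nodup.filter _ (pvNodup_pvS sets hpre k))

theorem pvB_eq (sets : List (List String)) (hpre : ∀ l ∈ sets, l.Nodup) :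
    get_overlap_speakers_for_plot_alt sets = (List.range sets.length).map (pvRow sets) := by
  unfold get_overlap_speakers_for_plot_alt
  rw [PySem.List.enumerate_eq_map_pyRange sets ([] : List String), PySem.List.len_eq,
    PySem.List.pyRange_zero_natCast, List.map_map, List.foldl_map]
  have main : ∀ n : Nat,
      ((List.range n).foldl
        (fun st (k : Nat) => pvStepB sets st (((k : Nat) : Int), PySem.List.pyGetD sets ((k : Nat) : Int) []))
        ([], PySem.Dict.empty)).1 = (List.range n).map (pvRow sets) ∧
      pvDI sets n ((List.range n).foldl
        (fun st (k : Nat) => pvStepB sets st (((k : Nat) : Int), PySem.List.pyGetD sets ((k : Nat) : Int) []))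
        ([], PySem.Dict.empty)).2 := by
    intro n
    induction n with
    | zero =>
      refine ⟨rfl, fun s j => ?_⟩
      rw [List.range_zero, List.foldl_nil]
      constructor
      · intro h
        rw [PySem.Dict.get?_empty] at h
        cases h
      · rintro ⟨jn, _, hlt, _⟩
        omega
    | succ n ih =>
      rw [List.range_succ, List.foldl_append, List.foldl_cons, List.foldl_nil]
      obtain ⟨ih1, ih2⟩ := ih
      rw [pvStepB_eq sets hpre n _ _ ih2]
      constructor
      · simp only [List.map_append]
        rw [ih1]
        rfl
      · exact pvDI_step sets n _ ih2
  simp only [Function.comp]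
  exact (main sets.length).1

-- ===== VERDICT (by name: the statement is the Claim_ definition above) =====
theorem get_overlap_speakers_for_plot_spec : Claim_equal_get_overlap_speakers_for_plot := by
  intro sets _hdom hpre
  unfold Spec_get_overlap_speakers_for_plot
  rw [pvA_eq, pvB_eq sets hpre]
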